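-- pv_equiv track=rewrite | github.com/raunakpalewar/ai-video-generation | myproject/main/py_script.py | adjust_start_times
-- ===== SOURCE A (Python) =====
-- def adjust_start_times(video_durations, sorted_videos):
--         adjusted_start_times = [0]
--
--         for i in range(1, len(sorted_videos)):
--             if sorted_videos[i]["sequence"] == sorted_videos[i-1]["sequence"]:
--                 adjusted_start_times.append(adjusted_start_times[-1])
--             else:
--                 adjusted_start_times.append(adjusted_start_times[-1] + video_durations[i-1])
--         return adjusted_start_times
-- ===== SOURCE B (Python) =====
-- def adjust_start_times(video_durations, sorted_videos):
--     # Two-pass: build the per-position increments first, then running prefix sums.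
--     increments = [0] + [
--         0 if cur["sequence"] == prev["sequence"] else video_durations[i]
--         for i, (prev, cur) in enumerate(zip(sorted_videos, sorted_videos[1:]))
--     ]
--     total = 0
--     starts = []
--     for inc in increments:
--         total += inc
--         starts.append(total)
--     return starts
-- ===== Notes on version B (the rewrite author's own statement) =====
-- stated objective: alternative
-- what changed: A maintains one growing list and reads its last element each iteration; B first precomputes a list of increments from consecutive video pairs and then produces the result as a separate prefix-sum pass.
import Mathlib
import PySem

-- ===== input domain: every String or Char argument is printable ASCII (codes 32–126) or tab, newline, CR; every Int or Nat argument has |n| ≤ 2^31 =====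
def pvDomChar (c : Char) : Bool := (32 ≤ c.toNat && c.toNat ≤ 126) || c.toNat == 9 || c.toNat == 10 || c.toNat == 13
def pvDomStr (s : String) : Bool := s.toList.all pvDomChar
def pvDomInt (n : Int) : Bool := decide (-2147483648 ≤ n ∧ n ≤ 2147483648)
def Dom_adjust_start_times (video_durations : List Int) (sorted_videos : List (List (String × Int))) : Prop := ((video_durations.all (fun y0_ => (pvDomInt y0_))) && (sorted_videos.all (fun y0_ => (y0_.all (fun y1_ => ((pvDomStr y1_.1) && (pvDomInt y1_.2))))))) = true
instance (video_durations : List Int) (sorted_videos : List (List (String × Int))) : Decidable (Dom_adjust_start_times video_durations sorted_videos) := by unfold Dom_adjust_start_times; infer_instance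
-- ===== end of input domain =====

-- B replaces A's single accumulator loop (reading acc[-1]) by a precomputed increments
-- list followed by a separate prefix-sum pass; objective: alternative decomposition.

-- ===== PORT A =====
-- d["sequence"]: KeyError (= get? none) is excluded by Pre_, so .getD 0 is never taken there
def pvSeqA (d : List (String × Int)) : Int := ((PySem.Dict.mk d).get? "sequence").getD 0

def adjust_start_times (video_durations : List Int) (sorted_videos : List (List (String × Int))) : List Int :=
  (PySem.List.pyRange 1 sorted_videos.length 1).foldl
    (fun acc i =>
      if pvSeqA (PySem.List.pyGetD sorted_videos i []) = pvSeqA (PySem.List.pyGetD sorted_videos (i - 1) [])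
      then acc ++ [PySem.List.pyGetD acc (-1) 0]
      else acc ++ [PySem.List.pyGetD acc (-1) 0 + PySem.List.pyGetD video_durations (i - 1) 0])
    [0]

-- ===== PORT B =====
def pvSeqB (d : List (String × Int)) : Int := ((PySem.Dict.mk d).get? "sequence").getD 0

def adjust_start_times_alt (video_durations : List Int) (sorted_videos : List (List (String × Int))) : List Int :=
  let increments : List Int := 0 ::
    (PySem.List.enumerate (sorted_videos.zip (PySem.List.slice sorted_videos (some 1) none)) 0).map
      (fun p => if pvSeqB p.2.2 = pvSeqB p.2.1 then 0 else PySem.List.pyGetD video_durations p.1 0)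
  (increments.foldl (fun (st : Int × List Int) inc => (st.1 + inc, st.2 ++ [st.1 + inc])) (0, [])).2

-- ===== PRECONDITION & SPEC =====
-- Pre_ excludes exactly the inputs where Python A raises: a KeyError when some visited dict
-- lacks "sequence" (every dict is visited once len ≥ 2), or an IndexError when a sequence
-- change at position i+1 needs video_durations[i] and that index is out of range.
def Pre_adjust_start_times (video_durations : List Int) (sorted_videos : List (List (String × Int))) : Prop :=
  (2 ≤ sorted_videos.length → ∀ d ∈ sorted_videos, ((PySem.Dict.mk d).get? "sequence").isSome = true) ∧
  (∀ i : Nat, i < sorted_videos.length - 1 →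
    (PySem.Dict.mk (sorted_videos.getD (i + 1) [])).get? "sequence" ≠ (PySem.Dict.mk (sorted_videos.getD i [])).get? "sequence" →
    i < video_durations.length)
instance (video_durations : List Int) (sorted_videos : List (List (String × Int))) : Decidable (Pre_adjust_start_times video_durations sorted_videos) := by unfold Pre_adjust_start_times; infer_instance

def pvWitness_adjust_start_times : List Int × (List (List (String × Int))) :=
  ([5, 3], [[("sequence", 1)], [("sequence", 1)], [("sequence", 2)]])

def Spec_adjust_start_times (video_durations : List Int) (sorted_videos : List (List (String × Int))) (out : List Int) : Prop := out = adjust_start_times_alt video_durations sorted_videos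
instance (video_durations : List Int) (sorted_videos : List (List (String × Int))) (out : List Int) : Decidable (Spec_adjust_start_times video_durations sorted_videos out) := by unfold Spec_adjust_start_times; infer_instance

-- ===== CLAIM (what is proved, stated in full; the proofs are below) =====
def Claim_equal_adjust_start_times : Prop := ∀ (video_durations : List Int) (sorted_videos : List (List (String × Int))), Dom_adjust_start_times video_durations sorted_videos → Pre_adjust_start_times video_durations sorted_videos → Spec_adjust_start_times video_durations sorted_videos (adjust_start_times video_durations sorted_videos)

-- ===== LEMMAS AND PROOFS =====

-- running prefix sums starting from total t
def pvPsums : Int → List Int → List Int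
  | _, [] => []
  | t, x :: xs => (t + x) :: pvPsums (t + x) xs

theorem pvFoldAcc (l : List Int) : ∀ (t : Int) (o : List Int),
    l.foldl (fun (st : Int × List Int) inc => (st.1 + inc, st.2 ++ [st.1 + inc])) (t, o)
      = (t + l.sum, o ++ pvPsums t l) := by
  induction l with
  | nil => intro t o; simp [pvPsums]
  | cons x xs ih =>
      intro t o
      simp only [List.foldl_cons, pvPsums, ih (t + x) (o ++ [t + x]), List.sum_cons,
        Prod.mk.injEq]
      exact ⟨by ring, by simp⟩

theorem pvPsums_append (l : List Int) : ∀ (t x : Int),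
    pvPsums t (l ++ [x]) = pvPsums t l ++ [t + l.sum + x] := by
  induction l with
  | nil => intro t x; simp [pvPsums]
  | cons y ys ih =>
      intro t x
      simp only [List.cons_append, pvPsums, ih (t + y) x, List.sum_cons]
      have : t + y + ys.sum + x = t + (y + ys.sum) + x := by ring
      rw [this]

theorem pvLastQ (l : List Int) : ∀ (t : Int),
    (t :: pvPsums t l).getLast? = some (t + l.sum) := by
  induction l with
  | nil => intro t; simp [pvPsums]
  | cons x xs ih =>
      intro t
      simp only [pvPsums, List.sum_cons, List.getLast?_cons_cons]
      rw [ih (t + x)]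
      ring_nf

theorem pvLast (l : List Int) (t : Int) :
    PySem.List.pyGetD (t :: pvPsums t l) (-1) 0 = t + l.sum := by
  simp [PySem.List.pyGetD, PySem.List.pyGet?_neg_one, pvLastQ]

-- increments list (without the leading 0) of B
def pvIncs (vd : List Int) (sv : List (List (String × Int))) : List Int :=
  (PySem.List.enumerate (sv.zip sv.tail) 0).map
    (fun p => if pvSeqB p.2.2 = pvSeqB p.2.1 then 0 else PySem.List.pyGetD vd p.1 0)

theorem pvIncs_length (vd : List Int) (sv : List (List (String × Int))) :
    (pvIncs vd sv).length = sv.length - 1 := by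
  simp [pvIncs, PySem.List.length_enumerate]

theorem pvB_char (vd : List Int) (sv : List (List (String × Int))) :
    adjust_start_times_alt vd sv = 0 :: pvPsums 0 (pvIncs vd sv) := by
  unfold adjust_start_times_alt
  rw [PySem.List.slice_from_one]
  simp only [List.foldl_cons, pvFoldAcc]
  simp [pvIncs]

theorem pvIncs_getElem (vd : List Int) (sv : List (List (String × Int))) (j : Nat)
    (h : j + 1 < sv.length) :
    (pvIncs vd sv)[j]? =
      some (if pvSeqB (sv[j + 1]'h) = pvSeqB (sv[j]'(by omega)) then 0
            else PySem.List.pyGetD vd (j : Int) 0) := by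
  have hj : j < (pvIncs vd sv).length := by rw [pvIncs_length]; omega
  rw [List.getElem?_eq_getElem hj]
  unfold pvIncs at hj ⊢
  rw [List.getElem_map, PySem.List.getElem_enumerate]
  have hz : j < (sv.zip sv.tail).length := by simpa [pvIncs, PySem.List.length_enumerate] using hj
  simp [List.getElem_zip, List.getElem_tail]

theorem pvA_char (vd : List Int) (sv : List (List (String × Int))) :
    ∀ (k : Nat), k ≤ sv.length →
    (PySem.List.pyRange 1 (k : Int) 1).foldl
      (fun acc i =>
        if pvSeqA (PySem.List.pyGetD sv i []) = pvSeqA (PySem.List.pyGetD sv (i - 1) [])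
        then acc ++ [PySem.List.pyGetD acc (-1) 0]
        else acc ++ [PySem.List.pyGetD acc (-1) 0 + PySem.List.pyGetD vd (i - 1) 0])
      [0] = 0 :: pvPsums 0 ((pvIncs vd sv).take (k - 1)) := by
  intro k
  induction k with
  | zero => intro _; rw [PySem.List.pyRange_one_eq_nil (by norm_num)]; simp [pvPsums]
  | succ k ih =>
      intro hk
      by_cases hk0 : k = 0
      · subst hk0
        rw [PySem.List.pyRange_one_eq_nil (by norm_num)]
        simp [pvPsums]
      · have hk1 : 1 ≤ (k : Int) := by exact_mod_cast Nat.one_le_iff_ne_zero.mpr hk0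
        have hkn : k < sv.length := by omega
        have hcast : ((k + 1 : Nat) : Int) = (k : Int) + 1 := by push_cast; ring
        rw [hcast, PySem.List.pyRange_one_succ_right hk1, List.foldl_append,
            ih (by omega)]
        have hget : PySem.List.pyGetD sv (k : Int) [] = sv[k]'hkn :=
          PySem.List.pyGetD_ofNat _ _ _ hkn
        have hcast2 : ((k : Int) - 1) = ((k - 1 : Nat) : Int) := by
          have : 1 ≤ k := Nat.one_le_iff_ne_zero.mpr hk0
          push_cast [this]; ring
        have hget2 : PySem.List.pyGetD sv ((k : Int) - 1) [] = sv[k - 1]'(by omega) := by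
          rw [hcast2]; exact PySem.List.pyGetD_ofNat _ _ _ (by omega)
        have htake : (pvIncs vd sv).take k
            = (pvIncs vd sv).take (k - 1) ++
              [if pvSeqB (sv[k]'hkn) = pvSeqB (sv[k - 1]'(by omega)) then 0
               else PySem.List.pyGetD vd ((k - 1 : Nat) : Int) 0] := by
          have hk' : k - 1 + 1 = k := by omega
          conv_lhs => rw [← hk', List.take_add_one]
          rw [pvIncs_getElem vd sv (k - 1) (by omega)]
          simp [hk']
        simp only [List.foldl_cons, List.foldl_nil, hget, hget2]
        rw [Nat.add_sub_cancel, htake, pvPsums_append, pvLast]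
        simp only [pvSeqA, pvSeqB]
        rw [hcast2]
        split_ifs with hc
        · simp
        · simp

-- ===== VERDICT (by name: the statement is the Claim_ definition above) =====
theorem adjust_start_times_spec : Claim_equal_adjust_start_times := by
  intro vd sv _ _
  unfold Spec_adjust_start_times
  rw [pvB_char]
  unfold adjust_start_times
  rw [pvA_char vd sv sv.length le_rfl,
      List.take_of_length_le (by rw [pvIncs_length])]
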